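-- pv_equiv track=rewrite | github.com/DrakeSeteraO/4_Bit_K_map_solver | segment pairer.py | sort_possibilities
-- ===== SOURCE A (Python) =====
-- def sort_possibilities(possibilities: list[str]):
--     temp = list()
--     for x in range(200):
--         temp.append(list())
--
--     for possible in possibilities:
--         score = score_value(possible)
--         temp[score].append(possible)
--
--     output = list()
--     for x in temp:
--         for y in x:
--              output.append(y)
--     return output
--
-- def score_value(possibility: str) -> int:
--     score = 0
--     for p in possibility:
--         if p.isalpha():
--             score += 1
--         elif p == "'":
--             score += 1
--     return score
-- ===== SOURCE B (Python) =====
-- def score_value(possibility: str) -> int: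
--     return sum(1 for p in possibility if p.isalpha() or p == "'")
--
-- def sort_possibilities(possibilities: list[str]):
--     return sorted(possibilities, key=score_value)
-- ===== Notes on version B (the rewrite author's own statement) =====
-- stated objective: idiomatic
-- what changed: Replaced the 200-slot bucket array (build buckets, distribute, concatenate) with a single stable key-based sort (sorted with key=score_value); sort stability reproduces the bucket-concatenation order exactly.
-- crash fix: On any input containing a string with 200 or more letter/apostrophe characters A raises IndexError (bucket index out of range); B returns the stably sorted list. — e.g. on sort_possibilities(["'''''''''''''''''''''''''''''''''''''''''''''''''''''''''''''''''''''''''''''''''''''''''''''''''''''''''''''''''''''…): A raises IndexError, B returns ["'''''''''''''''''''''''''''''''''''''''''''''''''''''''''''''''''''''''''''''''''''''''''''''''''''''''''''''''''''''…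
import Mathlib
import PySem

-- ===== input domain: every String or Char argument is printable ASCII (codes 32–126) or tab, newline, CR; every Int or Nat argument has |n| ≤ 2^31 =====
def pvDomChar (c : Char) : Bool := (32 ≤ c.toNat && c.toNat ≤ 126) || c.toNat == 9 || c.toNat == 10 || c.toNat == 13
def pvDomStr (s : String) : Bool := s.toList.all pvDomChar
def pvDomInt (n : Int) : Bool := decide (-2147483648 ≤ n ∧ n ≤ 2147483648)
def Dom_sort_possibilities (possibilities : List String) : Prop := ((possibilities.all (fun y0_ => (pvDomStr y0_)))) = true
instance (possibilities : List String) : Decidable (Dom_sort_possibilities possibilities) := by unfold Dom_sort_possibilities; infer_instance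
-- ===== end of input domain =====

-- B replaces A's 200-slot bucket array (distribute, then concatenate) with one stable key-based sort; idiomatic, same return value.

-- ===== PORT A =====
def score_value (possibility : String) : Int :=
  possibility.toList.foldl (fun score p =>
    if PySem.Chars.isalpha p then score + 1
    else if p == '\'' then score + 1
    else score) 0

-- temp[score]: score is a count, always ≥ 0, so .toNat is exact; an index ≥ 200 raises
-- IndexError in Python — those inputs are outside Pre_, and inside Pre_ .set/.getD are never out of range.
def sort_possibilities (possibilities : List String) : List String :=
  let temp : List (List String) := (List.range 200).foldl (fun temp _ => temp ++ [[]]) []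
  let temp := possibilities.foldl (fun temp possible =>
    let score := score_value possible
    temp.set score.toNat (temp.getD score.toNat [] ++ [possible])) temp
  let output := temp.foldl (fun output x => x.foldl (fun output y => output ++ [y]) output) []
  output

-- ===== PORT B =====
def score_value_alt (possibility : String) : Int :=
  ((possibility.toList.filter (fun p => PySem.Chars.isalpha p || p == '\'')).length : Int)

def sort_possibilities_alt (possibilities : List String) : List String :=
  PySem.List.sorted possibilities score_value_alt

-- ===== PRECONDITION & SPEC =====
-- Pre_ excludes exactly the inputs containing a string with 200 or more letter/apostrophe
-- characters: on those, A's bucket indexing temp[score] raises IndexError.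
def Pre_sort_possibilities (possibilities : List String) : Prop :=
  ∀ s ∈ possibilities, s.toList.countP (fun p => PySem.Chars.isalpha p || p == '\'') < 200
instance (possibilities : List String) : Decidable (Pre_sort_possibilities possibilities) := by
  unfold Pre_sort_possibilities; infer_instance
def pvWitness_sort_possibilities : List String := ["seg'a", "b", "", "12 x"]

-- On any input containing a string with ≥ 200 letter/apostrophe characters A raises IndexError; B returns the stably sorted list.
def Raises_sort_possibilities (possibilities : List String) : Prop :=
  ∃ s ∈ possibilities, 200 ≤ s.toList.countP (fun p => PySem.Chars.isalpha p || p == '\'')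
instance (possibilities : List String) : Decidable (Raises_sort_possibilities possibilities) := by
  unfold Raises_sort_possibilities; infer_instance
def pvRaiseWitness_sort_possibilities : List String := ["''''''''''''''''''''''''''''''''''''''''''''''''''''''''''''''''''''''''''''''''''''''''''''''''''''''''''''''''''''''''''''''''''''''''''''''''''''''''''''''''''''''''''''''''''''''''''''''''''''''''"]
def pvRaiseWitnessOut_sort_possibilities : List String := ["''''''''''''''''''''''''''''''''''''''''''''''''''''''''''''''''''''''''''''''''''''''''''''''''''''''''''''''''''''''''''''''''''''''''''''''''''''''''''''''''''''''''''''''''''''''''''''''''''''''''"]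

def Spec_sort_possibilities (possibilities : List String) (out : List String) : Prop := out = sort_possibilities_alt possibilities
instance (possibilities : List String) (out : List String) : Decidable (Spec_sort_possibilities possibilities out) := by unfold Spec_sort_possibilities; infer_instance

-- ===== CLAIM (what is proved, stated in full; the proofs are below) =====
def Claim_equal_sort_possibilities : Prop := ∀ (possibilities : List String), Dom_sort_possibilities possibilities → Pre_sort_possibilities possibilities → Spec_sort_possibilities possibilities (sort_possibilities possibilities)
def Claim_raises_sort_possibilities : Prop := (∀ (possibilities : List String), Dom_sort_possibilities possibilities → Raises_sort_possibilities possibilities → ¬ Pre_sort_possibilities possibilities) ∧ (Dom_sort_possibilities (pvRaiseWitness_sort_possibilities) ∧ Raises_sort_possibilities (pvRaiseWitness_sort_possibilities) ∧ sort_possibilities_alt (pvRaiseWitness_sort_possibilities) = pvRaiseWitnessOut_sort_possibilities)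

-- ===== LEMMAS AND PROOFS =====

-- the character predicate both scores count, and the resulting count
def pvP (p : Char) : Bool := PySem.Chars.isalpha p || p == '\''
def pvCnt (s : String) : Nat := s.toList.countP pvP

lemma score_alt_eq (s : String) : score_value_alt s = (pvCnt s : Int) := by
  rw [score_value_alt, pvCnt, List.countP_eq_length_filter]; rfl

lemma score_fold (l : List Char) : ∀ a : Int,
    l.foldl (fun score p => if PySem.Chars.isalpha p then score + 1 else if p == '\'' then score + 1 else score) a
      = a + l.countP pvP := by
  induction l with
  | nil => simp
  | cons c l ih =>
    intro a
    rw [List.foldl_cons, List.countP_cons, ih]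
    by_cases h1 : PySem.Chars.isalpha c
    · simp only [h1, pvP, if_true, Bool.true_or]; push_cast; ring
    · by_cases h2 : c = '\''
      · simp only [pvP, h2]; simp; ring
      · simp [pvP, h1, h2]

lemma score_eq (s : String) : score_value s = (pvCnt s : Int) := by
  rw [score_value, score_fold, pvCnt]; ring

lemma score_toNat (s : String) : (score_value s).toNat = pvCnt s := by
  rw [score_eq]; simp

-- the init loop builds 200 empty buckets
lemma init_loop (n : Nat) (acc : List (List String)) :
    (List.range n).foldl (fun t _ => t ++ [[]]) acc = acc ++ List.replicate n [] := by
  induction n generalizing acc with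
  | zero => simp
  | succ n ih => simp [List.range_succ, List.foldl_append, ih, List.replicate_succ']

lemma getD_map_range {α : Type} (g : Nat → α) (d : α) (n s : Nat) (h : s < n) :
    ((List.range n).map g).getD s d = g s := by
  simp [List.getD_eq_getElem?_getD, h]

lemma set_map_range {α : Type} (g : Nat → α) (n s : Nat) (v : α) (_h : s < n) :
    ((List.range n).map g).set s v = (List.range n).map (fun k => if k = s then v else g k) := by
  apply List.ext_getElem
  · simp
  · intro i hi1 hi2
    rw [List.getElem_set]
    by_cases he : s = i
    · subst he; simp
    · rw [if_neg he]
      simp only [List.getElem_map, List.getElem_range]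
      rw [if_neg (fun h' => he h'.symm)]

-- the distribution loop fills bucket k with the elements of score k, in order
lemma distribute_clean (xs : List String) :
    ∀ (g : Nat → List String), (∀ x ∈ xs, pvCnt x < 200) →
    xs.foldl (fun temp possible =>
        temp.set (pvCnt possible) (temp.getD (pvCnt possible) [] ++ [possible])) ((List.range 200).map g)
      = (List.range 200).map (fun k => g k ++ xs.filter (fun y => pvCnt y == k)) := by
  induction xs with
  | nil => intro g _; simp
  | cons x xs ih =>
    intro g hs
    have hx : pvCnt x < 200 := hs x (by simp)
    rw [List.foldl_cons, getD_map_range _ _ _ _ hx, set_map_range _ _ _ _ hx,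
      ih (fun k => if k = pvCnt x then g (pvCnt x) ++ [x] else g k) (fun y hy => hs y (by simp [hy]))]
    apply List.map_congr_left
    intro k hk
    by_cases hke : k = pvCnt x
    · subst hke; simp
    · rw [List.filter_cons]
      simp [hke]
      intro h; exact absurd h.symm hke

lemma distribute_loop (xs : List String) (g : Nat → List String) (h : ∀ x ∈ xs, pvCnt x < 200) :
    xs.foldl (fun temp possible =>
        temp.set (score_value possible).toNat (temp.getD (score_value possible).toNat [] ++ [possible])) ((List.range 200).map g)
      = (List.range 200).map (fun k => g k ++ xs.filter (fun y => pvCnt y == k)) := by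
  have hfun : (fun (temp : List (List String)) possible =>
      temp.set (score_value possible).toNat (temp.getD (score_value possible).toNat [] ++ [possible]))
      = (fun temp possible => temp.set (pvCnt possible) (temp.getD (pvCnt possible) [] ++ [possible])) := by
    funext t p; simp [score_toNat]
  rw [hfun, distribute_clean xs g h]

lemma inner_concat (x : List String) : ∀ (o : List String),
    x.foldl (fun output y => output ++ [y]) o = o ++ x := by
  induction x with
  | nil => simp
  | cons a x ih => intro o; rw [List.foldl_cons, ih]; simp

lemma concat_loop (ts : List (List String)) : ∀ (o : List String),
    ts.foldl (fun output x => x.foldl (fun output y => output ++ [y]) output) o = o ++ ts.flatten := by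
  induction ts with
  | nil => simp
  | cons t ts ih => intro o; rw [List.foldl_cons, inner_concat, ih]; simp

lemma insertBy_nil {α : Type} (before : α → α → Bool) (x : α) :
    PySem.List.insertBy before x [] = [x] := rfl

lemma insertBy_cons {α : Type} (before : α → α → Bool) (x y : α) (ys : List α) :
    PySem.List.insertBy before x (y :: ys)
      = if before x y then x :: y :: ys else y :: PySem.List.insertBy before x ys := rfl

lemma insertBy_append_left {α : Type} (before : α → α → Bool) (x : α) (l r : List α)
    (h : ∀ y ∈ l, before x y = false) :
    PySem.List.insertBy before x (l ++ r) = l ++ PySem.List.insertBy before x r := by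
  induction l with
  | nil => simp
  | cons a l ih =>
    have ha : before x a = false := h a (by simp)
    rw [List.cons_append, insertBy_cons, ha]
    simp only [Bool.false_eq_true, if_false, List.cons_append]
    rw [ih (fun y hy => h y (by simp [hy]))]

-- inserting an element into concatenated, strictly index-increasing buckets appends it to its own bucket
lemma insert_flatten (x : String) (ks : List Nat) (g : Nat → List String)
    (hp : ks.Pairwise (· < ·)) (hmem : pvCnt x ∈ ks)
    (hg : ∀ k ∈ ks, ∀ y ∈ g k, pvCnt y = k) :
    PySem.List.insertBy (fun a b => decide (score_value_alt a < score_value_alt b)) x (ks.map g).flatten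
      = (ks.map (fun k => if k = pvCnt x then g k ++ [x] else g k)).flatten := by
  induction ks with
  | nil => exact absurd hmem (by simp)
  | cons k ks ih =>
    rw [List.map_cons, List.map_cons, List.flatten_cons, List.flatten_cons]
    rcases List.mem_cons.mp hmem with hk | hk
    · -- x belongs to the first bucket: walk past it, then x goes right at the front of the rest
      subst hk
      rw [insertBy_append_left _ _ _ _ (by
        intro y hy
        have := hg _ (by simp) y hy
        simp [score_alt_eq, this])]
      have hrest : PySem.List.insertBy (fun a b => decide (score_value_alt a < score_value_alt b)) x
          (ks.map g).flatten = x :: (ks.map g).flatten := by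
        cases hfl : (ks.map g).flatten with
        | nil => rw [insertBy_nil]
        | cons h t =>
          have hh : h ∈ (ks.map g).flatten := by rw [hfl]; simp
          obtain ⟨gk, hgk, hhgk⟩ := List.mem_flatten.mp hh
          obtain ⟨k', hk', rfl⟩ := List.mem_map.mp hgk
          have hlt : pvCnt x < pvCnt h := by
            rw [hg k' (by simp [hk']) h hhgk]
            exact (List.pairwise_cons.mp hp).1 k' hk'
          rw [insertBy_cons]
          have : decide (score_value_alt x < score_value_alt h) = true := by
            simp [score_alt_eq]; exact_mod_cast hlt
          rw [this, if_pos rfl]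
      rw [hrest, if_pos rfl]
      have hmap : ks.map (fun k => if k = pvCnt x then g k ++ [x] else g k) = ks.map g := by
        apply List.map_congr_left
        intro k' hk'
        have : k' ≠ pvCnt x := Nat.ne_of_gt ((List.pairwise_cons.mp hp).1 k' hk')
        rw [if_neg this]
      rw [hmap]; simp
    · -- x belongs to a later bucket: the whole first bucket is passed over
      have hkx : k < pvCnt x := (List.pairwise_cons.mp hp).1 _ hk
      rw [insertBy_append_left _ _ _ _ (by
        intro y hy
        have := hg k (by simp) y hy
        simp [score_alt_eq, this]; omega)]
      rw [ih (List.pairwise_cons.mp hp).2 hk (fun k' hk' => hg k' (by simp [hk'])),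
        if_neg (by omega)]

-- the stable sort equals the concatenation of the score buckets
lemma sorted_eq_buckets (xs : List String) (hpre : ∀ x ∈ xs, pvCnt x < 200) :
    PySem.List.sorted xs score_value_alt
      = ((List.range 200).map (fun k => xs.filter (fun y => pvCnt y == k))).flatten := by
  induction xs using List.reverseRecOn with
  | nil =>
    rw [show PySem.List.sorted ([] : List String) score_value_alt = [] from rfl]
    symm
    rw [List.flatten_eq_nil_iff]
    intro l hl
    obtain ⟨k, _, rfl⟩ := List.mem_map.mp hl
    rfl
  | append_singleton xs x ih =>
    rw [PySem.List.sorted_eq_foldl_insertBy, List.foldl_append, List.foldl_cons, List.foldl_nil,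
      ← PySem.List.sorted_eq_foldl_insertBy, ih (fun y hy => hpre y (by simp [hy]))]
    rw [insert_flatten x (List.range 200) _ (List.pairwise_lt_range)
      (by simp; exact hpre x (by simp))
      (by intro k _ y hy
          have h2 := (List.mem_filter.mp hy).2
          simpa using h2)]
    apply congrArg
    apply List.map_congr_left
    intro k hk
    rw [List.filter_append]
    by_cases hke : k = pvCnt x
    · subst hke; simp
    · simp [hke]
      intro h; exact absurd h.symm hke

-- ===== VERDICT (by name: the statement is the Claim_ definition above) =====
theorem sort_possibilities_spec : Claim_equal_sort_possibilities := by
  intro ps _ hpre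
  have hpre' : ∀ x ∈ ps, pvCnt x < 200 := hpre
  unfold Spec_sort_possibilities
  simp only [sort_possibilities, sort_possibilities_alt]
  rw [init_loop, List.nil_append, sorted_eq_buckets ps hpre']
  have hrep : List.replicate 200 ([] : List String) = (List.range 200).map (fun _ => []) := by
    simp [List.map_const']
  rw [hrep, distribute_loop ps (fun _ => []) hpre', concat_loop, List.nil_append]
  simp

set_option maxRecDepth 100000
@[simp]
theorem sort_possibilities_raises : Claim_raises_sort_possibilities := by
  unfold Claim_raises_sort_possibilities
  constructor
  · rintro ps _ ⟨s, hs, h⟩ hpre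
    exact absurd (hpre s hs) (by omega)
  · refine ⟨by decide, by decide, by decide⟩
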